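-- pv_equiv track=rewrite | github.com/page-fault-in-nonpaged-area/host-relay | hr/policy.py | _tokenize_stage
-- ===== SOURCE A (Python) =====
-- def _tokenize_stage(stage: str, mask: list[bool], offset: int) -> list[str]:
--     """Split a stage into whitespace-separated tokens, respecting quotes."""
--     tokens: list[str] = []
--     current: list[str] = []
--     i = 0
--     while i < len(stage):
--         if not mask[offset + i] and stage[i] in " \t":
--             if current:
--                 tokens.append("".join(current))
--                 current = []
--         else:
--             current.append(stage[i])
--         i += 1
--     if current:
--         tokens.append("".join(current))
--     return tokens
-- ===== SOURCE B (Python) =====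
-- def _tokenize_stage(stage: str, mask: list[bool], offset: int) -> list[str]:
--     """Split a stage into whitespace-separated tokens, respecting quotes.
--
--     Run-based two-pointer scan: skip maximal delimiter runs, slice out maximal
--     non-delimiter runs as tokens (no per-character accumulator).
--     """
--     n = len(stage)
--
--     def is_delim(i: int) -> bool:
--         return (not mask[offset + i]) and stage[i] in " \t"
--
--     tokens: list[str] = []
--     i = 0
--     while i < n:
--         if is_delim(i):
--             i += 1
--         else:
--             j = i + 1
--             while j < n and not is_delim(j):
--                 j += 1
--             tokens.append(stage[i:j])
--             i = j
--     return tokens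
-- ===== Notes on version B (the rewrite author's own statement) =====
-- stated objective: alternative
-- what changed: Replaces A's per-character state machine with a `current` accumulator by a two-pointer run scan that skips maximal delimiter runs and slices out maximal non-delimiter runs as whole tokens.
import Mathlib
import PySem

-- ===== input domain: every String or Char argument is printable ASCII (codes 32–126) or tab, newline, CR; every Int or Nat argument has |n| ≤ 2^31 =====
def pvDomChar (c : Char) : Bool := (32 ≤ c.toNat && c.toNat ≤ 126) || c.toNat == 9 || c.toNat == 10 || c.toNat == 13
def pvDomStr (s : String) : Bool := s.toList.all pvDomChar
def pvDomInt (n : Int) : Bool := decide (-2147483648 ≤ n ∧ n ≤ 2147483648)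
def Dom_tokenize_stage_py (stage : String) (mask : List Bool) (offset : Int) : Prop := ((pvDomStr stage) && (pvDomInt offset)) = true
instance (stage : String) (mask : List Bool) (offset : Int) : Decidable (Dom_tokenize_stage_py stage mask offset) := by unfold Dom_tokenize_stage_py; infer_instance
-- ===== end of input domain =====

-- B replaces A's per-character accumulator state machine by a two-pointer run scan
-- (skip delimiter runs, slice out maximal non-delimiter runs); objective: alternative decomposition.

-- ===== PORT A =====
-- A's while loop over indices, with the running `tokens`/`current` state.
def tokA_go (mask : List Bool) (offset : Int) :
    List Char → Int → List String → List Char → List String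
  | [], _, tokens, current =>
      if current.isEmpty then tokens else tokens ++ [String.ofList current]
  | c :: rest, i, tokens, current =>
      match PySem.List.pyGet? mask (offset + i) with
      | none => []   -- IndexError in Python; excluded by Pre_
      | some m =>
          if !m && (c == ' ' || c == '\t') then
            tokA_go mask offset rest (i + 1)
              (if current.isEmpty then tokens else tokens ++ [String.ofList current]) []
          else
            tokA_go mask offset rest (i + 1) tokens (current ++ [c])

def tokenize_stage_py (stage : String) (mask : List Bool) (offset : Int) : List String :=
  tokA_go mask offset stage.toList 0 [] []

-- ===== PORT B =====
-- B's is_delim(i); none = IndexError (excluded by Pre_).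
def tokB_delim? (mask : List Bool) (offset : Int) (i : Int) (c : Char) : Option Bool :=
  (PySem.List.pyGet? mask (offset + i)).map (fun m => !m && (c == ' ' || c == '\t'))

-- B's inner `while j < n and not is_delim(j)` run scan: returns (token, remaining, next index).
def tokB_run (mask : List Bool) (offset : Int) :
    List Char → Int → List Char → Option (List Char × List Char × Int)
  | [], i, acc => some (acc, [], i)
  | c :: rest, i, acc =>
      match tokB_delim? mask offset i c with
      | none => none
      | some true => some (acc, c :: rest, i)
      | some false => tokB_run mask offset rest (i + 1) (acc ++ [c])

-- needed by tokB_go's termination proof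
lemma tokB_run_length (mask : List Bool) (offset : Int) :
    ∀ (cs : List Char) (i : Int) (acc tok rest' : List Char) (i' : Int),
      tokB_run mask offset cs i acc = some (tok, rest', i') → rest'.length ≤ cs.length := by
  intro cs
  induction cs with
  | nil => intro i acc tok rest' i' h; simp [tokB_run] at h; simp [h.2.1]
  | cons c rest ih =>
      intro i acc tok rest' i' h
      simp only [tokB_run] at h
      cases hd : tokB_delim? mask offset i c with
      | none => rw [hd] at h; simp at h
      | some b =>
        rw [hd] at h
        cases b with
        | true => simp at h; simp [← h.2.1]
        | false =>
            simp only at h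
            have := ih (i + 1) (acc ++ [c]) tok rest' i' h
            simpa using Nat.le_succ_of_le this

-- B's outer while loop.
def tokB_go (mask : List Bool) (offset : Int) : List Char → Int → List String
  | [], _ => []
  | c :: rest, i =>
      match tokB_delim? mask offset i c with
      | none => []   -- IndexError in Python; excluded by Pre_
      | some true => tokB_go mask offset rest (i + 1)
      | some false =>
          match h : tokB_run mask offset rest (i + 1) [c] with
          | none => []
          | some (tok, rest', i') => String.ofList tok :: tokB_go mask offset rest' i'
  termination_by cs _ => cs.length
  decreasing_by
    · simp
    · have := tokB_run_length mask offset rest (i + 1) [c] tok rest' i' h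
      simp; omega

def tokenize_stage_py_alt (stage : String) (mask : List Bool) (offset : Int) : List String :=
  tokB_go mask offset stage.toList 0

-- ===== PRECONDITION & SPEC =====
-- Pre_ excludes exactly the inputs on which Python A raises IndexError
-- (some offset+i, 0 ≤ i < len(stage), outside the valid index range of mask).
def Pre_tokenize_stage_py (stage : String) (mask : List Bool) (offset : Int) : Prop :=
  ∀ k : Nat, k < stage.toList.length → PySem.Raise.InRange mask.length (offset + k)
instance (stage : String) (mask : List Bool) (offset : Int) : Decidable (Pre_tokenize_stage_py stage mask offset) := by unfold Pre_tokenize_stage_py; infer_instance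

def pvWitness_tokenize_stage_py : String × List Bool × Int :=
  ("ab c", [true, false, false, false], 0)

def Spec_tokenize_stage_py (stage : String) (mask : List Bool) (offset : Int) (out : List String) : Prop := out = tokenize_stage_py_alt stage mask offset
instance (stage : String) (mask : List Bool) (offset : Int) (out : List String) : Decidable (Spec_tokenize_stage_py stage mask offset out) := by unfold Spec_tokenize_stage_py; infer_instance

-- ===== CLAIM (what is proved, stated in full; the proofs are below) =====
def Claim_equal_tokenize_stage_py : Prop := ∀ (stage : String) (mask : List Bool) (offset : Int), Dom_tokenize_stage_py stage mask offset → Pre_tokenize_stage_py stage mask offset → Spec_tokenize_stage_py stage mask offset (tokenize_stage_py stage mask offset)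

-- ===== LEMMAS AND PROOFS =====

-- unfolding lemma for tokB_go on a cons cell (plain match, no `h :` binder)
lemma tokB_go_cons (mask : List Bool) (offset : Int) (c : Char) (rest : List Char) (i : Int) :
    tokB_go mask offset (c :: rest) i =
      match tokB_delim? mask offset i c with
      | none => []
      | some true => tokB_go mask offset rest (i + 1)
      | some false =>
          match tokB_run mask offset rest (i + 1) [c] with
          | none => []
          | some (tok, rest', i') => String.ofList tok :: tokB_go mask offset rest' i' := by
  cases hd : tokB_delim? mask offset i c with
  | none => simp [tokB_go, hd]
  | some b =>
      cases b
      · cases hr : tokB_run mask offset rest (i + 1) [c] with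
        | none => simp [tokB_go, hd]; split <;> simp_all
        | some r => obtain ⟨tok, rest', i'⟩ := r; simp [tokB_go, hd]; split <;> simp_all
      · simp [tokB_go, hd]

-- Main invariant: with all lookups along cs in range,
-- (P) A's loop with empty `current` computes `tokens ++` B's outer loop, and
-- (Q) A's loop with nonempty `current` computes `tokens ++` B's run scan followed by B's outer loop.
lemma tok_main (mask : List Bool) (offset : Int) :
    ∀ (cs : List Char) (i : Int),
      (∀ k : Nat, k < cs.length → (PySem.List.pyGet? mask (offset + (i + k))).isSome) →
      (∀ tokens, tokA_go mask offset cs i tokens [] = tokens ++ tokB_go mask offset cs i) ∧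
      (∀ tokens cur, cur ≠ [] →
        tokA_go mask offset cs i tokens cur =
          tokens ++ (match tokB_run mask offset cs i cur with
                     | none => []
                     | some (tok, rest', i') => String.ofList tok :: tokB_go mask offset rest' i')) := by
  intro cs
  induction cs with
  | nil =>
      intro i _
      constructor
      · intro tokens; simp [tokA_go, tokB_go]
      · intro tokens cur hcur
        simp [tokA_go, tokB_run, tokB_go, hcur]
  | cons c rest ih =>
      intro i H
      have h0 : (PySem.List.pyGet? mask (offset + i)).isSome := by
        have := H 0 (by simp)
        simpa using this
      obtain ⟨m, hm⟩ := Option.isSome_iff_exists.mp h0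
      have H' : ∀ k : Nat, k < rest.length →
          (PySem.List.pyGet? mask (offset + (i + 1 + k))).isSome := by
        intro k hk
        have := H (k + 1) (by simpa using Nat.succ_lt_succ hk)
        have e : offset + (i + ((k + 1 : Nat) : Int)) = offset + (i + 1 + k) := by
          push_cast; ring
        rw [e] at this; simpa using this
      obtain ⟨ihP, ihQ⟩ := ih (i + 1) H'
      have hd : tokB_delim? mask offset i c = some (!m && (c == ' ' || c == '\t')) := by
        simp [tokB_delim?, hm]
      constructor
      · -- P
        intro tokens
        by_cases hdl : (!m && (c == ' ' || c == '\t')) = true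
        · simp only [tokA_go, hm, hdl, if_pos, List.isEmpty_nil]
          rw [tokB_go_cons, hd]
          rw [hdl]
          exact ihP tokens
        · rw [show tokA_go mask offset (c :: rest) i tokens [] =
              tokA_go mask offset rest (i + 1) tokens ([] ++ [c]) by
            simp [tokA_go, hm, hdl]]
          have hb : (!m && (c == ' ' || c == '\t')) = false := by
            simpa using hdl
          rw [tokB_go_cons, hd]
          simp only [hb]
          exact ihQ tokens [c] (by simp)
      · -- Q
        intro tokens cur hcur
        by_cases hdl : (!m && (c == ' ' || c == '\t')) = true
        · have hA : tokA_go mask offset (c :: rest) i tokens cur =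
              tokA_go mask offset rest (i + 1) (tokens ++ [String.ofList cur]) [] := by
            simp [tokA_go, hm, hdl, hcur]
          rw [hA, ihP]
          simp only [tokB_run, hd, hdl]
          rw [tokB_go_cons, hd]
          simp only [hdl]
          simp
        · have hb : (!m && (c == ' ' || c == '\t')) = false := by simpa using hdl
          have hA : tokA_go mask offset (c :: rest) i tokens cur =
              tokA_go mask offset rest (i + 1) tokens (cur ++ [c]) := by
            simp [tokA_go, hm, hb]
          rw [hA, ihQ tokens (cur ++ [c]) (by simp)]
          simp only [tokB_run, hd, hb]

-- ===== VERDICT (by name: the statement is the Claim_ definition above) =====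
theorem tokenize_stage_py_spec : Claim_equal_tokenize_stage_py := by
  intro stage mask offset _ hpre
  unfold Spec_tokenize_stage_py tokenize_stage_py tokenize_stage_py_alt
  have H : ∀ k : Nat, k < stage.toList.length →
      (PySem.List.pyGet? mask (offset + ((0 : Int) + k))).isSome := by
    intro k hk
    have := hpre k hk
    rw [show offset + ((0 : Int) + (k : Int)) = offset + k by ring]
    rw [Option.isSome_iff_ne_none]
    intro hnone
    exact ((PySem.List.pyGet?_eq_none_iff mask (offset + k)).mp hnone) this
  exact (tok_main mask offset stage.toList 0 H).1 []
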